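-- pv_equiv track=rewrite | github.com/EdwardKYC/code-space | onlinejudge/security.py | gen_from_mask
-- ===== SOURCE A (Python) =====
-- import argparse, base64, itertools, string, time
--
-- def gen_from_mask(mask_list, positions, charset):
--     if not positions:
--         yield ''.join(mask_list)
--         return
--     for prod in itertools.product(charset, repeat=len(positions)):
--         tmp = list(mask_list)
--         for p,ch in zip(positions, prod):
--             tmp[p] = ch
--         yield ''.join(tmp)
-- ===== SOURCE B (Python) =====
-- def gen_from_mask(mask_list, positions, charset):
--     # Recursive backtracking over positions (work buffer reused), instead of
--     # materialising itertools.product tuples.  Same output order: the last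
--     # position varies fastest.
--     snapshot = tuple(charset)
--     n = len(positions)
--     work = list(mask_list)
--
--     def rec(i):
--         if i == n:
--             yield ''.join(work)
--             return
--         p = positions[i]
--         for ch in snapshot:
--             work[p] = ch
--             yield from rec(i + 1)
--
--     yield from rec(0)
-- ===== Notes on version B (the rewrite author's own statement) =====
-- stated objective: alternative
-- what changed: Replaces the itertools.product enumeration (a fresh copy of mask_list and a zip-assignment pass per product tuple) with a recursive backtracking generator over positions that reuses one work buffer and assigns one character per level.
import Mathlib
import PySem

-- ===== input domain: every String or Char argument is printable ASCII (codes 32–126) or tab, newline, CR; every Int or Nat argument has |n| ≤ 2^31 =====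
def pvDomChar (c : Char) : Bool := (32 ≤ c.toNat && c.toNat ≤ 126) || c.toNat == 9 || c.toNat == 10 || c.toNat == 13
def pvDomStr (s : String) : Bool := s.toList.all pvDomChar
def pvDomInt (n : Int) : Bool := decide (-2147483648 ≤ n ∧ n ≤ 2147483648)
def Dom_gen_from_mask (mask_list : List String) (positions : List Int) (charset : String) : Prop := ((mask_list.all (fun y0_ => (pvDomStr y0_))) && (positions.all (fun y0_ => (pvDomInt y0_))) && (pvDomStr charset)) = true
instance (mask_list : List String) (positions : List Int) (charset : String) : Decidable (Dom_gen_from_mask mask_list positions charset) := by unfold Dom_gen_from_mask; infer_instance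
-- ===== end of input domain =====

-- B replaces the itertools.product enumeration with a recursive backtracking
-- generator over positions (one character assignment per tree edge); same output order.

-- ===== PORT A =====
-- itertools.product(charset, repeat=n), first coordinate varying slowest
def pvProduct (cs : List Char) : Nat → List (List Char)
  | 0 => [[]]
  | n + 1 => cs.flatMap (fun c => (pvProduct cs n).map (fun t => c :: t))

def gen_from_mask (mask_list : List String) (positions : List Int) (charset : String) : List String :=
  if positions = [] then
    [PySem.Str.join "" mask_list]
  else
    (pvProduct charset.toList positions.length).map (fun prod =>
      PySem.Str.join "" ((positions.zip prod).foldl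
        (fun tmp pc => PySem.List.pySetD tmp pc.1 (String.mk [pc.2])) mask_list))

-- ===== PORT B =====
-- rec(i): at each level assign positions[i] := ch for each ch of the snapshot and recurse.
-- (B mutates one shared work buffer; since every level reassigns its position before
-- yielding, passing the updated buffer functionally is the same computation.)
def pvAltRec (snapshot : List Char) (work : List String) : List Int → List String
  | [] => [PySem.Str.join "" work]
  | p :: rest =>
      snapshot.flatMap (fun ch => pvAltRec snapshot (PySem.List.pySetD work p (String.mk [ch])) rest)

def gen_from_mask_alt (mask_list : List String) (positions : List Int) (charset : String) : List String :=
  pvAltRec charset.toList mask_list positions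

-- ===== PRECONDITION & SPEC =====
-- A (and B) raise IndexError when some position is out of range AND the loop body actually
-- runs, i.e. positions and charset are both nonempty; Pre_ excludes exactly those inputs.
def Pre_gen_from_mask (mask_list : List String) (positions : List Int) (charset : String) : Prop :=
  positions = [] ∨ charset.toList = [] ∨ ∀ p ∈ positions, PySem.Raise.InRange mask_list.length p
instance (mask_list : List String) (positions : List Int) (charset : String) : Decidable (Pre_gen_from_mask mask_list positions charset) := by unfold Pre_gen_from_mask; infer_instance

def pvWitness_gen_from_mask : List String × List Int × String := (["a", "b", "c"], [0, 2], "xy")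

def Spec_gen_from_mask (mask_list : List String) (positions : List Int) (charset : String) (out : List String) : Prop := out = gen_from_mask_alt mask_list positions charset
instance (mask_list : List String) (positions : List Int) (charset : String) (out : List String) : Decidable (Spec_gen_from_mask mask_list positions charset out) := by unfold Spec_gen_from_mask; infer_instance

-- ===== CLAIM (what is proved, stated in full; the proofs are below) =====
def Claim_equal_gen_from_mask : Prop := ∀ (mask_list : List String) (positions : List Int) (charset : String), Dom_gen_from_mask mask_list positions charset → Pre_gen_from_mask mask_list positions charset → Spec_gen_from_mask mask_list positions charset (gen_from_mask mask_list positions charset)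

-- ===== LEMMAS AND PROOFS =====
theorem pvAltRec_eq_product (snapshot : List Char) (positions : List Int) (work : List String) :
    pvAltRec snapshot work positions =
      (pvProduct snapshot positions.length).map (fun prod =>
        PySem.Str.join "" ((positions.zip prod).foldl
          (fun tmp pc => PySem.List.pySetD tmp pc.1 (String.mk [pc.2])) work)) := by
  induction positions generalizing work with
  | nil => simp [pvAltRec, pvProduct]
  | cons p rest ih =>
      simp only [pvAltRec, pvProduct, List.length_cons, List.map_flatMap, List.map_map]
      refine List.flatMap_congr ?_
      intro c _
      rw [ih]
      simp [Function.comp, List.zip_cons_cons]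

-- ===== VERDICT (by name: the statement is the Claim_ definition above) =====
theorem gen_from_mask_spec : Claim_equal_gen_from_mask := by
  intro mask_list positions charset _ _
  unfold Spec_gen_from_mask gen_from_mask gen_from_mask_alt
  rw [pvAltRec_eq_product]
  split
  · next h => subst h; simp [pvProduct]
  · rfl
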